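-- pv_equiv track=rewrite | github.com/chiralcentre/Kattis | gradingonacurve.py | satisfy_conds
-- ===== SOURCE A (Python) =====
-- def satisfy_conds(K,N,scores):
--     first,second,third = 0,0,0
--     for s in scores:
--         if s * 10 >= 7 * K:
--             third += 1
--         if s * 10 >= 8 * K:
--             second += 1
--         if s * 10 >= 9 * K:
--             first += 1
--     return first * 4 >= N and second * 2 >= N and third * 4 >= 3 * N
-- ===== SOURCE B (Python) =====
-- def satisfy_conds(K, N, scores):
--     # sort-then-binary-search: count of scores reaching each cutoff = n - bisect_left
--     def _bisect_left(a, x):  # CPython's bisect.bisect_left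
--         lo, hi = 0, len(a)
--         while lo < hi:
--             mid = (lo + hi) // 2
--             if a[mid] < x:
--                 lo = mid + 1
--             else:
--                 hi = mid
--         return lo
--     T = sorted(s * 10 for s in scores)
--     n = len(T)
--     first = n - _bisect_left(T, 9 * K)
--     second = n - _bisect_left(T, 8 * K)
--     third = n - _bisect_left(T, 7 * K)
--     return first * 4 >= N and second * 2 >= N and third * 4 >= 3 * N
-- ===== Notes on version B (the rewrite author's own statement) =====
-- stated objective: alternative
-- what changed: Replaces the single counting pass (three running counters updated per score) by sort-then-binary-search: B sorts the scaled scores once and obtains each of the three counts as n - bisect_left(T, c*K).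
import Mathlib
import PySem

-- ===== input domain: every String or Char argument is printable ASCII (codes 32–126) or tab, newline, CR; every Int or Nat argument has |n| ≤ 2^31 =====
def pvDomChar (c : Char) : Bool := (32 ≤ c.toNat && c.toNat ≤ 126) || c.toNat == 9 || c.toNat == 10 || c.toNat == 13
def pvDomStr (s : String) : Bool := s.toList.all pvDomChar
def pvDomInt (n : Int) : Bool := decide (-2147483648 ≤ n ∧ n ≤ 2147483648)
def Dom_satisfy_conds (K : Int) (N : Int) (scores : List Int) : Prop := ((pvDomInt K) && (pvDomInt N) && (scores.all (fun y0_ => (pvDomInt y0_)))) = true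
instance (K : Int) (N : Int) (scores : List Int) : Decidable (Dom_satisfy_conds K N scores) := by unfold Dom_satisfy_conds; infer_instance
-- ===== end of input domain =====

-- B replaces A's single counting pass by sort + binary search (same results; not faster, a genuinely different strategy).

-- ===== PORT A =====
def satisfy_conds (K : Int) (N : Int) (scores : List Int) : Bool :=
  let st := scores.foldl (fun (acc : Int × Int × Int) s =>
      let third := if s * 10 ≥ 7 * K then acc.2.2 + 1 else acc.2.2
      let second := if s * 10 ≥ 8 * K then acc.2.1 + 1 else acc.2.1
      let first := if s * 10 ≥ 9 * K then acc.1 + 1 else acc.1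
      (first, second, third)) (0, 0, 0)
  decide (st.1 * 4 ≥ N) && (decide (st.2.1 * 2 ≥ N) && decide (st.2.2 * 4 ≥ 3 * N))

-- ===== PORT B =====
-- Source B's hand-written _bisect_left is CPython's bisect.bisect_left loop; ported as PySem.List.bisectLeft (the same binary search).
def satisfy_conds_alt (K : Int) (N : Int) (scores : List Int) : Bool :=
  let T := PySem.List.sorted (scores.map (fun s => s * 10)) (fun x => x) false
  let n : Int := T.length
  let first : Int := n - PySem.List.bisectLeft T (9 * K)
  let second : Int := n - PySem.List.bisectLeft T (8 * K)
  let third : Int := n - PySem.List.bisectLeft T (7 * K)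
  decide (first * 4 ≥ N) && (decide (second * 2 ≥ N) && decide (third * 4 ≥ 3 * N))

-- ===== PRECONDITION & SPEC =====
def Spec_satisfy_conds (K : Int) (N : Int) (scores : List Int) (out : Bool) : Prop := out = satisfy_conds_alt K N scores
instance (K : Int) (N : Int) (scores : List Int) (out : Bool) : Decidable (Spec_satisfy_conds K N scores out) := by unfold Spec_satisfy_conds; infer_instance

-- ===== CLAIM (what is proved, stated in full; the proofs are below) =====
def Claim_equal_satisfy_conds : Prop := ∀ (K : Int) (N : Int) (scores : List Int), Dom_satisfy_conds K N scores → Spec_satisfy_conds K N scores (satisfy_conds K N scores)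

-- ===== LEMMAS AND PROOFS =====

-- A's accumulating fold computes the three counts.
theorem pv_fold_counts (K : Int) (scores : List Int) (a b c : Int) :
    scores.foldl (fun (acc : Int × Int × Int) s =>
      let third := if s * 10 ≥ 7 * K then acc.2.2 + 1 else acc.2.2
      let second := if s * 10 ≥ 8 * K then acc.2.1 + 1 else acc.2.1
      let first := if s * 10 ≥ 9 * K then acc.1 + 1 else acc.1
      (first, second, third)) (a, b, c)
    = (a + (scores.countP (fun s => decide (s * 10 ≥ 9 * K)) : Int),
       b + (scores.countP (fun s => decide (s * 10 ≥ 8 * K)) : Int),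
       c + (scores.countP (fun s => decide (s * 10 ≥ 7 * K)) : Int)) := by
  induction scores generalizing a b c with
  | nil => simp
  | cons x xs ih =>
    simp only [List.foldl_cons, List.countP_cons, ih]
    by_cases h9 : x * 10 ≥ 9 * K <;> by_cases h8 : x * 10 ≥ 8 * K <;> by_cases h7 : x * 10 ≥ 7 * K <;>
      simp [h9, h8, h7, Prod.ext_iff] <;> omega

-- On a ≤-sorted list, bisect_left counts the elements below the needle.
theorem pv_bisectLeft_eq_countP (T : List Int) (t : Int) (hs : T.Pairwise (· ≤ ·)) :
    PySem.List.bisectLeft T t = T.countP (fun x => decide (x < t)) := by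
  obtain ⟨hle, hlt, hge⟩ := PySem.List.bisectLeft_spec T t hs
  set b := PySem.List.bisectLeft T t with hb
  have h1 : (T.take b).countP (fun x => decide (x < t)) = b := by
    have : ∀ x ∈ T.take b, (fun x => decide (x < t)) x = true := by
      intro x hx
      obtain ⟨j, hj, rfl⟩ := List.mem_iff_getElem.mp hx
      have hjb : j < b := by rwa [List.length_take_of_le hle] at hj
      have hjT : j < T.length := lt_of_lt_of_le hjb hle
      have := hlt j hjT hjb
      simpa [List.getElem_take] using this
    rw [List.countP_eq_length.mpr this, List.length_take_of_le hle]
  have h2 : (T.drop b).countP (fun x => decide (x < t)) = 0 := by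
    apply List.countP_eq_zero.mpr
    intro x hx
    obtain ⟨j, hj, rfl⟩ := List.mem_iff_getElem.mp hx
    have hjT : b + j < T.length := by simpa [Nat.add_comm] using Nat.add_lt_of_lt_sub (by simpa [List.length_drop] using hj)
    have := hge (b + j) hjT (Nat.le_add_right _ _)
    simp only [List.getElem_drop]
    simpa using not_lt.mpr this
  have := List.countP_append (l₁ := T.take b) (l₂ := T.drop b) (p := fun x => decide (x < t))
  rw [List.take_append_drop] at this
  omega

-- count of (¬ < t) = count of (t ≤ ·)
theorem pv_countP_not_lt (T : List Int) (t : Int) :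
    T.countP (fun x => decide (t ≤ x)) = T.length - T.countP (fun x => decide (x < t)) := by
  have h := List.length_eq_countP_add_countP (p := fun x => decide (x < t)) (l := T)
  have h2 : T.countP (fun a => decide ¬((fun x => decide (x < t)) a = true)) = T.countP (fun x => decide (t ≤ x)) := by
    apply List.countP_congr; intro x _; simp [not_lt]
  simp only [decide_not] at h h2
  omega

-- B's "n - bisect_left(T, t)" is the count of scores s with s*10 ≥ t.
theorem pv_count_ge (scores : List Int) (t : Int) :
    ((PySem.List.sorted (scores.map (fun s => s * 10)) (fun x => x) false).length : Int)
      - PySem.List.bisectLeft (PySem.List.sorted (scores.map (fun s => s * 10)) (fun x => x) false) t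
    = (scores.countP (fun s => decide (s * 10 ≥ t)) : Int) := by
  set T := PySem.List.sorted (scores.map (fun s => s * 10)) (fun x => x) false with hT
  have hs : T.Pairwise (· ≤ ·) := by
    simpa using PySem.List.sorted_pairwise (xs := scores.map (fun s => s * 10)) (key := fun x => x)
  have hperm : T.Perm (scores.map (fun s => s * 10)) := PySem.List.sorted_perm _ _ _
  have hcnt : T.countP (fun x => decide (t ≤ x)) = scores.countP (fun s => decide (s * 10 ≥ t)) := by
    rw [hperm.countP_eq, List.countP_map]; rfl
  have hb := pv_bisectLeft_eq_countP T t hs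
  have hnot := pv_countP_not_lt T t
  have hle : T.countP (fun x => decide (x < t)) ≤ T.length := List.countP_le_length
  omega

-- ===== VERDICT (by name: the statement is the Claim_ definition above) =====
theorem satisfy_conds_spec : Claim_equal_satisfy_conds := by
  intro K N scores _
  unfold Spec_satisfy_conds satisfy_conds satisfy_conds_alt
  simp only [pv_fold_counts, pv_count_ge, zero_add, ge_iff_le]
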